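-- pv_equiv track=rewrite | github.com/AyushSMD/OnieroRAG | scripts/the_big_dipper.py | get_archetype
-- ===== SOURCE A (Python) =====
-- def get_archetype(term):
--     archetypes = {
--         "ruler": ["boss", "leader", "aristocrat", "king", "queen", "politician", "role model", "manager", "administrator"],
--         "creator": ["artist", "inventor", "innovator", "musician", "writer", "dreamer", "creator"],
--         "sage": ["expert", "scholar", "detective", "advisor", "thinker", "philosopher", "academic", "researcher", "planner", "professional", "mentor", "teacher", "contemplative"],
--         "innocent": ["utopian", "traditionalist", "naive", "mystic", "saint", "romantic", "dreamer"],
--         "explorer": ["seeker", "iconoclast", "wanderer", "individualist", "pilgrim"],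
--         "rebel": ["outlaw", "revolutionary", "wild man", "misfit", "iconoclast"],
--         "hero": ["warrior", "crusader", "rescuer", "superhero", "soldier", "dragon slayer", "winner", "team player"],
--         "wizard": ["magician", "visionary", "catalyst", "inventor", "charismatic leader", "shaman", "healer", "medicine man"],
--         "jester": ["fool", "trickster", "joker", "practical joker", "comedian"],
--         "everyman": ["good old boy", "regular guy", "regular girl", "person next door", "realist", "working stiff", "solid citizen", "good neighbor", "silent majority"],
--         "lover": ["partner", "friend", "intimate", "enthusiast", "sensualist", "spouse", "team-builder"],
--         "caregiver": ["saint", "altruist", "parent", "helper", "supporter"]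
--     }
--
--     for archetype, terms in archetypes.items():
--         if term in terms or term == archetype:
--             return archetype
--
--     return "everyman"
-- ===== SOURCE B (Python) =====
-- # Flat reverse-lookup table, first-wins already resolved (e.g. "dreamer" -> "creator").
-- _TERM_TO_ARCHETYPE = {
--     "boss": "ruler",
--     "leader": "ruler",
--     "aristocrat": "ruler",
--     "king": "ruler",
--     "queen": "ruler",
--     "politician": "ruler",
--     "role model": "ruler",
--     "manager": "ruler",
--     "administrator": "ruler",
--     "ruler": "ruler",
--     "artist": "creator",
--     "inventor": "creator",
--     "innovator": "creator",
--     "musician": "creator",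
--     "writer": "creator",
--     "dreamer": "creator",
--     "creator": "creator",
--     "expert": "sage",
--     "scholar": "sage",
--     "detective": "sage",
--     "advisor": "sage",
--     "thinker": "sage",
--     "philosopher": "sage",
--     "academic": "sage",
--     "researcher": "sage",
--     "planner": "sage",
--     "professional": "sage",
--     "mentor": "sage",
--     "teacher": "sage",
--     "contemplative": "sage",
--     "sage": "sage",
--     "utopian": "innocent",
--     "traditionalist": "innocent",
--     "naive": "innocent",
--     "mystic": "innocent",
--     "saint": "innocent",
--     "romantic": "innocent",
--     "innocent": "innocent",
--     "seeker": "explorer",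
--     "iconoclast": "explorer",
--     "wanderer": "explorer",
--     "individualist": "explorer",
--     "pilgrim": "explorer",
--     "explorer": "explorer",
--     "outlaw": "rebel",
--     "revolutionary": "rebel",
--     "wild man": "rebel",
--     "misfit": "rebel",
--     "rebel": "rebel",
--     "warrior": "hero",
--     "crusader": "hero",
--     "rescuer": "hero",
--     "superhero": "hero",
--     "soldier": "hero",
--     "dragon slayer": "hero",
--     "winner": "hero",
--     "team player": "hero",
--     "hero": "hero",
--     "magician": "wizard",
--     "visionary": "wizard",
--     "catalyst": "wizard",
--     "charismatic leader": "wizard",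
--     "shaman": "wizard",
--     "healer": "wizard",
--     "medicine man": "wizard",
--     "wizard": "wizard",
--     "fool": "jester",
--     "trickster": "jester",
--     "joker": "jester",
--     "practical joker": "jester",
--     "comedian": "jester",
--     "jester": "jester",
--     "good old boy": "everyman",
--     "regular guy": "everyman",
--     "regular girl": "everyman",
--     "person next door": "everyman",
--     "realist": "everyman",
--     "working stiff": "everyman",
--     "solid citizen": "everyman",
--     "good neighbor": "everyman",
--     "silent majority": "everyman",
--     "everyman": "everyman",
--     "partner": "lover",
--     "friend": "lover",
--     "intimate": "lover",
--     "enthusiast": "lover",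
--     "sensualist": "lover",
--     "spouse": "lover",
--     "team-builder": "lover",
--     "lover": "lover",
--     "altruist": "caregiver",
--     "parent": "caregiver",
--     "helper": "caregiver",
--     "supporter": "caregiver",
--     "caregiver": "caregiver",
-- }
--
--
-- def get_archetype(term):
--     return _TERM_TO_ARCHETYPE.get(term, "everyman")
-- ===== Notes on version B (the rewrite author's own statement) =====
-- stated objective: idiomatic
-- what changed: Replaces the per-call scan over twelve archetype term lists with a single flat term-to-archetype dict (first-wins collisions resolved in the table itself), so each call is one hash lookup with a default.
import Mathlib
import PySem

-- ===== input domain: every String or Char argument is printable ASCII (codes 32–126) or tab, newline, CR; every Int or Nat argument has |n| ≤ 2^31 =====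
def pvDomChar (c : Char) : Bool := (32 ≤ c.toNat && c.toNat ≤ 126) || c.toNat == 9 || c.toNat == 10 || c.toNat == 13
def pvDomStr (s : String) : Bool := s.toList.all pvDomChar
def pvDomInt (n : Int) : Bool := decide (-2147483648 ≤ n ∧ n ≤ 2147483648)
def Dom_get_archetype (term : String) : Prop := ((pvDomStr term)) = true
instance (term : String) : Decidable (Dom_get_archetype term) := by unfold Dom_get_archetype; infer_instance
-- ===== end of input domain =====

-- B replaces A's per-call scan over twelve archetype term lists by one flat term→archetype
-- dict (first-wins collisions pre-resolved in the table), so a call is a single lookup.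

-- ===== PORT A =====
-- A's literal archetypes dict, as its items list (insertion order)
def pvArchetypesA : List (String × List String) := [
  ("ruler", ["boss", "leader", "aristocrat", "king", "queen", "politician", "role model", "manager", "administrator"]),
  ("creator", ["artist", "inventor", "innovator", "musician", "writer", "dreamer", "creator"]),
  ("sage", ["expert", "scholar", "detective", "advisor", "thinker", "philosopher", "academic", "researcher", "planner", "professional", "mentor", "teacher", "contemplative"]),
  ("innocent", ["utopian", "traditionalist", "naive", "mystic", "saint", "romantic", "dreamer"]),
  ("explorer", ["seeker", "iconoclast", "wanderer", "individualist", "pilgrim"]),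
  ("rebel", ["outlaw", "revolutionary", "wild man", "misfit", "iconoclast"]),
  ("hero", ["warrior", "crusader", "rescuer", "superhero", "soldier", "dragon slayer", "winner", "team player"]),
  ("wizard", ["magician", "visionary", "catalyst", "inventor", "charismatic leader", "shaman", "healer", "medicine man"]),
  ("jester", ["fool", "trickster", "joker", "practical joker", "comedian"]),
  ("everyman", ["good old boy", "regular guy", "regular girl", "person next door", "realist", "working stiff", "solid citizen", "good neighbor", "silent majority"]),
  ("lover", ["partner", "friend", "intimate", "enthusiast", "sensualist", "spouse", "team-builder"]),
  ("caregiver", ["saint", "altruist", "parent", "helper", "supporter"])]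

-- A's loop with early return: scan the pairs, return the first matching archetype
def pvScanA (term : String) : List (String × List String) → String
  | [] => "everyman"
  | (archetype, terms) :: rest =>
      if terms.contains term || term == archetype then archetype else pvScanA term rest

def get_archetype (term : String) : String := pvScanA term pvArchetypesA

-- ===== PORT B =====
-- Source B's flat dict literal _TERM_TO_ARCHETYPE (no duplicate keys; first-wins pre-resolved)
def pvTermToArchetype : PySem.Dict String String := PySem.Dict.mk [
  ("boss", "ruler"),
  ("leader", "ruler"),
  ("aristocrat", "ruler"),
  ("king", "ruler"),
  ("queen", "ruler"),
  ("politician", "ruler"),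
  ("role model", "ruler"),
  ("manager", "ruler"),
  ("administrator", "ruler"),
  ("ruler", "ruler"),
  ("artist", "creator"),
  ("inventor", "creator"),
  ("innovator", "creator"),
  ("musician", "creator"),
  ("writer", "creator"),
  ("dreamer", "creator"),
  ("creator", "creator"),
  ("expert", "sage"),
  ("scholar", "sage"),
  ("detective", "sage"),
  ("advisor", "sage"),
  ("thinker", "sage"),
  ("philosopher", "sage"),
  ("academic", "sage"),
  ("researcher", "sage"),
  ("planner", "sage"),
  ("professional", "sage"),
  ("mentor", "sage"),
  ("teacher", "sage"),
  ("contemplative", "sage"),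
  ("sage", "sage"),
  ("utopian", "innocent"),
  ("traditionalist", "innocent"),
  ("naive", "innocent"),
  ("mystic", "innocent"),
  ("saint", "innocent"),
  ("romantic", "innocent"),
  ("innocent", "innocent"),
  ("seeker", "explorer"),
  ("iconoclast", "explorer"),
  ("wanderer", "explorer"),
  ("individualist", "explorer"),
  ("pilgrim", "explorer"),
  ("explorer", "explorer"),
  ("outlaw", "rebel"),
  ("revolutionary", "rebel"),
  ("wild man", "rebel"),
  ("misfit", "rebel"),
  ("rebel", "rebel"),
  ("warrior", "hero"),
  ("crusader", "hero"),
  ("rescuer", "hero"),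
  ("superhero", "hero"),
  ("soldier", "hero"),
  ("dragon slayer", "hero"),
  ("winner", "hero"),
  ("team player", "hero"),
  ("hero", "hero"),
  ("magician", "wizard"),
  ("visionary", "wizard"),
  ("catalyst", "wizard"),
  ("charismatic leader", "wizard"),
  ("shaman", "wizard"),
  ("healer", "wizard"),
  ("medicine man", "wizard"),
  ("wizard", "wizard"),
  ("fool", "jester"),
  ("trickster", "jester"),
  ("joker", "jester"),
  ("practical joker", "jester"),
  ("comedian", "jester"),
  ("jester", "jester"),
  ("good old boy", "everyman"),
  ("regular guy", "everyman"),
  ("regular girl", "everyman"),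
  ("person next door", "everyman"),
  ("realist", "everyman"),
  ("working stiff", "everyman"),
  ("solid citizen", "everyman"),
  ("good neighbor", "everyman"),
  ("silent majority", "everyman"),
  ("everyman", "everyman"),
  ("partner", "lover"),
  ("friend", "lover"),
  ("intimate", "lover"),
  ("enthusiast", "lover"),
  ("sensualist", "lover"),
  ("spouse", "lover"),
  ("team-builder", "lover"),
  ("lover", "lover"),
  ("altruist", "caregiver"),
  ("parent", "caregiver"),
  ("helper", "caregiver"),
  ("supporter", "caregiver"),
  ("caregiver", "caregiver")]

def get_archetype_alt (term : String) : String := pvTermToArchetype.getD term "everyman"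

-- ===== PRECONDITION & SPEC =====
def Spec_get_archetype (term : String) (out : String) : Prop := out = get_archetype_alt term
instance (term : String) (out : String) : Decidable (Spec_get_archetype term out) := by unfold Spec_get_archetype; infer_instance

-- ===== CLAIM =====
def Claim_equal_get_archetype : Prop := ∀ (term : String), Dom_get_archetype term → Spec_get_archetype term (get_archetype term)

-- ===== LEMMAS AND PROOFS =====

-- first-match association lookup (= get? of a literal dict, = A's scan after flattening)
def pvLookup (t : String) : List (String × String) → Option String
  | [] => none
  | (k, v) :: rest => if k == t then some v else pvLookup t rest

theorem pvGet?_mk_eq_lookup (t : String) (l : List (String × String)) :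
    (PySem.Dict.mk l).get? t = pvLookup t l := by
  induction l with
  | nil => rfl
  | cons p rest ih =>
      obtain ⟨k, v⟩ := p
      rw [PySem.Dict.get?_mk_cons, pvLookup, ih]

theorem pvLookup_eq_none_iff (t : String) (l : List (String × String)) :
    pvLookup t l = none ↔ t ∉ l.map Prod.fst := by
  induction l with
  | nil => simp [pvLookup]
  | cons p rest ih =>
      obtain ⟨k, v⟩ := p
      by_cases h : k = t
      · subst h; simp [pvLookup]
      · have : (k == t) = false := by simpa using h
        simp [pvLookup, this, ih, Ne.symm h]

theorem pvLookup_append (t : String) (l₁ l₂ : List (String × String)) :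
    pvLookup t (l₁ ++ l₂) = (pvLookup t l₁).or (pvLookup t l₂) := by
  induction l₁ with
  | nil => simp [pvLookup]
  | cons p rest ih =>
      obtain ⟨k, v⟩ := p
      simp only [List.cons_append, pvLookup, ih]
      split <;> simp

theorem pvLookup_map_const (t a : String) (ts : List String) :
    pvLookup t (ts.map (fun s => (s, a))) = if ts.contains t then some a else none := by
  induction ts with
  | nil => simp [pvLookup]
  | cons s rest ih =>
      simp only [List.map_cons, pvLookup, ih]
      rcases eq_or_ne s t with h | h
      · subst h; simp
      · have h1 : (s == t) = false := by simpa using h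
        have h2 : ¬ t = s := fun e => h e.symm
        simp [h1, h2]

-- flatten A's table into first-match pairs: each archetype contributes its terms then itself
def pvFlatten (tbl : List (String × List String)) : List (String × String) :=
  tbl.flatMap (fun p => p.2.map (fun s => (s, p.1)) ++ [(p.1, p.1)])

-- extensional equality of two first-match tables with the same key set
theorem pvLookup_ext (l₁ l₂ : List (String × String))
    (h₁ : ∀ p ∈ l₁, pvLookup p.1 l₁ = pvLookup p.1 l₂)
    (h₂ : ∀ p ∈ l₂, pvLookup p.1 l₁ = pvLookup p.1 l₂) :
    ∀ t, pvLookup t l₁ = pvLookup t l₂ := by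
  intro t
  by_cases m₁ : t ∈ l₁.map Prod.fst
  · obtain ⟨p, hp, hfst⟩ := List.mem_map.mp m₁
    exact hfst ▸ h₁ p hp
  · by_cases m₂ : t ∈ l₂.map Prod.fst
    · obtain ⟨p, hp, hfst⟩ := List.mem_map.mp m₂
      exact hfst ▸ h₂ p hp
    · rw [(pvLookup_eq_none_iff t l₁).mpr m₁, (pvLookup_eq_none_iff t l₂).mpr m₂]

-- A's scan equals first-match lookup over the flattened table
theorem pvScanA_eq_lookup_flatten (term : String) (tbl : List (String × List String)) :
    pvScanA term tbl = (pvLookup term (pvFlatten tbl)).getD "everyman" := by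
  induction tbl with
  | nil => rfl
  | cons p rest ih =>
      obtain ⟨a, ts⟩ := p
      simp only [pvScanA, pvFlatten, List.flatMap_cons, pvLookup_append]
      rw [pvLookup_map_const]
      have hsingle : pvLookup term [(a, a)] = if term == a then some a else none := by
        rcases eq_or_ne a term with h | h
        · subst h; simp [pvLookup]
        · have h1 : (a == term) = false := by simpa using h
          have h2 : (term == a) = false := by simpa using h.symm
          simp [pvLookup, h1, h2]
      rw [hsingle]
      by_cases hts : term ∈ ts
      · simp [hts]
      · by_cases ha : term = a
        · subst ha; simp [hts]
        · have h2 : (term == a) = false := by simpa using ha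
          simp [pvFlatten] at ih
          simp [hts, h2, ih]

-- the two concrete tables agree on every key of either (finite check)
set_option maxRecDepth 100000 in
theorem pvTables_agree :
    ∀ t, pvLookup t (pvFlatten pvArchetypesA) = pvLookup t pvTermToArchetype.items := by
  apply pvLookup_ext <;> decide

-- ===== VERDICT =====
theorem get_archetype_spec : Claim_equal_get_archetype := by
  intro term _
  show get_archetype term = get_archetype_alt term
  rw [get_archetype, get_archetype_alt, PySem.Dict.getD_eq_get?_getD,
    pvGet?_mk_eq_lookup, pvScanA_eq_lookup_flatten, pvTables_agree]
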